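-- pv_equiv track=rewrite | github.com/gabrielvicino/IntensivaCalculator | modules/gerador/_base.py | _caps_obs_linha
-- ===== SOURCE A (Python) =====
-- def _caps_obs_linha(val: str) -> str:
--     """
--     Converte linha de obs (diagnósticos) de CAPS para forma gramatical.
--     Nomes científicos de bactérias: Gênero com 1ª maiúscula, espécie em minúsculas.
--     Ex: ENTEROCCOCUS FEACALIS e PROTEUS MIRABILIS -> Enterococcus faecalis e Proteus mirabilis
--     """
--     if val is None or not isinstance(val, str):
--         return val
--     s = str(val).strip()
--     if not s or s != s.upper():
--         return val
--     exceto = {"de", "da", "do", "das", "dos", "e", "em", "com", "para", "por", "a", "o", "as", "os", "no", "na"}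
--     palavras = s.split()
--     resultado = []
--     i = 0
--     while i < len(palavras):
--         p = palavras[i]
--         p_lower = p.lower()
--         # Palavra só com letras = candidata a nome científico
--         so_letras = p.replace("-", "").replace(".", "").isalpha()
--         # Par GÊNERO ESPÉCIE (ambos caps, ambos não-conjunção) -> "Gênero espécie"
--         if so_letras and p_lower not in exceto and i + 1 < len(palavras):
--             prox = palavras[i + 1]
--             prox_lower = prox.lower()
--             prox_letras = prox.replace("-", "").replace(".", "").isalpha()
--             if prox_letras and prox_lower not in exceto:
--                 resultado.append(p_lower.capitalize())
--                 resultado.append(prox_lower)  # espécie em minúsculas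
--                 i += 2
--                 continue
--         if p_lower in exceto:
--             resultado.append(p_lower)
--         else:
--             resultado.append(p_lower.capitalize())
--         i += 1
--     return " ".join(resultado)
-- ===== SOURCE B (Python) =====
-- def _caps_obs_linha(val: str) -> str:
--     """Same normalization, written as one pass with a run-parity counter instead of index lookahead."""
--     if val is None or not isinstance(val, str):
--         return val
--     s = str(val).strip()
--     if not s or s != s.upper():
--         return val
--     exceto = {"de", "da", "do", "das", "dos", "e", "em", "com", "para", "por", "a", "o", "as", "os", "no", "na"}
--     out = []
--     run = 0
--     for p in s.split():
--         w = p.lower()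
--         if p.replace("-", "").replace(".", "").isalpha() and w not in exceto:
--             out.append(w.capitalize() if run % 2 == 0 else w)
--             run += 1
--         else:
--             out.append(w if w in exceto else w.capitalize())
--             run = 0
--     return " ".join(out)
-- ===== Notes on version B (the rewrite author's own statement) =====
-- stated objective: simpler
-- what changed: Replaced A's index-based while loop with two-word lookahead pairing (and i += 2 / continue control flow) by a single for-loop over the words that keeps a run-parity counter: candidate words capitalize on even run positions and lowercase on odd ones, non-candidates reset the counter.
import Mathlib
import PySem

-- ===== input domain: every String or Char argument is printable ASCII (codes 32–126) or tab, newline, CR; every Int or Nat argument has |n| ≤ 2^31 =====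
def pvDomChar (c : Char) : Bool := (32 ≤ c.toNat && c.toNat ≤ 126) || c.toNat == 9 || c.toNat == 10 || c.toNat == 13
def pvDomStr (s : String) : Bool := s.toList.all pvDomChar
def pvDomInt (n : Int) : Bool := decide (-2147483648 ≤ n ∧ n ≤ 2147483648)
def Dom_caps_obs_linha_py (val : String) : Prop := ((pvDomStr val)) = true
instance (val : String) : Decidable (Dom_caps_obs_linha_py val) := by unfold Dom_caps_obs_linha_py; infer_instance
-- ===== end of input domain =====

-- B rewrites A's index-with-lookahead pairing loop as a single fold keeping a run-parity
-- counter; objective: simpler, same return value (no speed claim).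

-- shared helpers (identical literal expressions in both Pythons)
-- the `exceto` set literal
def pvExceto : List (List Char) :=
  ["de".toList, "da".toList, "do".toList, "das".toList, "dos".toList, "e".toList,
   "em".toList, "com".toList, "para".toList, "por".toList, "a".toList, "o".toList,
   "as".toList, "os".toList, "no".toList, "na".toList]

-- p.replace("-", "").replace(".", "").isalpha()
def pvSoLetras (p : List Char) : Bool :=
  PySem.Chars.strIsalpha (PySem.Chars.replace (PySem.Chars.replace p "-".toList "".toList) ".".toList "".toList)

-- w.capitalize(): first char title-cased (= upper on ASCII), rest lowered; exact on the ASCII domain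
def pvCap (w : List Char) : List Char :=
  match w with
  | [] => []
  | c :: r => PySem.Chars.upperChar c :: PySem.Chars.lower r

-- ===== PORT A =====
-- the `while i < len(palavras)` loop of A, as structural recursion on the remaining words
def pvLoopA : List (List Char) → List (List Char)
  | [] => []
  | p :: rest =>
    if pvSoLetras p && !pvExceto.contains (PySem.Chars.lower p) then
      match rest with
      | prox :: rest2 =>
        if pvSoLetras prox && !pvExceto.contains (PySem.Chars.lower prox) then
          pvCap (PySem.Chars.lower p) :: PySem.Chars.lower prox :: pvLoopA rest2
        else
          (if pvExceto.contains (PySem.Chars.lower p) then PySem.Chars.lower p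
           else pvCap (PySem.Chars.lower p)) :: pvLoopA (prox :: rest2)
      | [] => [if pvExceto.contains (PySem.Chars.lower p) then PySem.Chars.lower p
               else pvCap (PySem.Chars.lower p)]
    else
      (if pvExceto.contains (PySem.Chars.lower p) then PySem.Chars.lower p
       else pvCap (PySem.Chars.lower p)) :: pvLoopA rest

def caps_obs_linha_py (val : String) : String :=
  -- `val is None or not isinstance(val, str)` can never hold for a String argument
  let s := PySem.Chars.strip val.toList
  if s = [] ∨ s ≠ PySem.Chars.upper s then val
  else String.ofList (PySem.Chars.join " ".toList (pvLoopA (PySem.Chars.split₀ s)))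

-- ===== PORT B =====
-- B's loop body: state = (resultado so far, run counter)
def pvStepB (st : List (List Char) × Nat) (p : List Char) : List (List Char) × Nat :=
  if pvSoLetras p && !pvExceto.contains (PySem.Chars.lower p) then
    (st.1 ++ [if st.2 % 2 = 0 then pvCap (PySem.Chars.lower p) else PySem.Chars.lower p], st.2 + 1)
  else
    (st.1 ++ [if pvExceto.contains (PySem.Chars.lower p) then PySem.Chars.lower p
              else pvCap (PySem.Chars.lower p)], 0)

def caps_obs_linha_py_alt (val : String) : String :=
  let s := PySem.Chars.strip val.toList
  if s = [] ∨ s ≠ PySem.Chars.upper s then val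
  else String.ofList (PySem.Chars.join " ".toList ((PySem.Chars.split₀ s).foldl pvStepB ([], 0)).1)

-- ===== PRECONDITION & SPEC =====
def Spec_caps_obs_linha_py (val : String) (out : String) : Prop := out = caps_obs_linha_py_alt val
instance (val : String) (out : String) : Decidable (Spec_caps_obs_linha_py val out) := by unfold Spec_caps_obs_linha_py; infer_instance

-- ===== CLAIM (what is proved, stated in full; the proofs are below) =====
def Claim_equal_caps_obs_linha_py : Prop := ∀ (val : String), Dom_caps_obs_linha_py val → Spec_caps_obs_linha_py val (caps_obs_linha_py val)

-- ===== LEMMAS AND PROOFS =====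

-- proof-side view of B's fold: the words still to process together with the current run counter
def pvGoB : List (List Char) → Nat → List (List Char)
  | [], _ => []
  | p :: rest, run =>
    if pvSoLetras p && !pvExceto.contains (PySem.Chars.lower p) then
      (if run % 2 = 0 then pvCap (PySem.Chars.lower p) else PySem.Chars.lower p) :: pvGoB rest (run + 1)
    else
      (if pvExceto.contains (PySem.Chars.lower p) then PySem.Chars.lower p
       else pvCap (PySem.Chars.lower p)) :: pvGoB rest 0

theorem pvFoldB_eq_go (l : List (List Char)) (acc : List (List Char)) (run : Nat) :
    (l.foldl pvStepB (acc, run)).1 = acc ++ pvGoB l run := by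
  induction l generalizing acc run with
  | nil => simp [pvGoB]
  | cons p rest ih =>
    simp only [List.foldl_cons, pvStepB, pvGoB]
    by_cases h : pvSoLetras p = true ∧ PySem.Chars.lower p ∉ pvExceto <;>
      simp [h, ih]

theorem pvGoB_parity (l : List (List Char)) (run run' : Nat) (h : run % 2 = run' % 2) :
    pvGoB l run = pvGoB l run' := by
  induction l generalizing run run' with
  | nil => rfl
  | cons p rest ih =>
    simp only [pvGoB]
    by_cases hc : pvSoLetras p = true ∧ PySem.Chars.lower p ∉ pvExceto
    · simp [hc, h, ih (run + 1) (run' + 1) (by omega)]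
    · simp [hc]

theorem pvGoB_zero_eq_loopA (l : List (List Char)) : pvGoB l 0 = pvLoopA l := by
  induction l using pvLoopA.induct with
  | case1 => rfl
  | case2 p hc prox rest2 hcp ih =>
    simp only [pvGoB, pvLoopA]
    simp only [Bool.and_eq_true, Bool.not_eq_eq_eq_not, Bool.not_true,
      List.contains_eq_mem, decide_eq_false_iff_not] at hc hcp
    simp [hc, hcp, pvGoB_parity rest2 2 0 (by omega), ih]
  | case3 p hc prox rest2 hcp ih =>
    simp only [pvGoB, pvLoopA, ← ih]
    simp only [Bool.and_eq_true, Bool.not_eq_eq_eq_not, Bool.not_true,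
      List.contains_eq_mem, decide_eq_false_iff_not] at hc
    simp only [Bool.and_eq_true, Bool.not_eq_eq_eq_not, Bool.not_true,
      List.contains_eq_mem, decide_eq_false_iff_not] at hcp
    simp [hc, hcp]
  | case4 p hc =>
    simp only [Bool.and_eq_true, Bool.not_eq_eq_eq_not, Bool.not_true,
      List.contains_eq_mem, decide_eq_false_iff_not] at hc
    simp [pvGoB, pvLoopA, hc]
  | case5 p rest hc ih =>
    simp only [Bool.and_eq_true, Bool.not_eq_eq_eq_not, Bool.not_true,
      List.contains_eq_mem, decide_eq_false_iff_not] at hc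
    cases rest with
    | nil => simp [pvGoB, pvLoopA, hc]
    | cons prox rest2 => simp [pvGoB, pvLoopA, hc, ← ih]

-- ===== VERDICT (by name: the statement is the Claim_ definition above) =====
theorem caps_obs_linha_py_spec : Claim_equal_caps_obs_linha_py := by
  intro val _
  unfold Spec_caps_obs_linha_py caps_obs_linha_py caps_obs_linha_py_alt
  simp only [pvFoldB_eq_go, List.nil_append, pvGoB_zero_eq_loopA]
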